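-- pv_equiv track=rewrite | github.com/harshitmawandia/IITD-courses | 1st Sem/COL100/A5.py | stringProblem
-- ===== SOURCE A (Python) =====
-- def stringProblem(a,b):
--     if a==b:
--         return 0           #if a and b are same, no changes are required
--     elif b=="":
--         return len(a)      #if b is empty you have to delete all the elements in 'a' so it takes len(a) steps
--     elif a=="":
--         return len(b)      #if 'a' is empty you have to insert all the elemennts in 'b' so it takes len(b) steps
--     elif a[0]==b[0]:
--         return stringProblem(a[1:],b[1:])      #if the first letter of a = first letter of b, no changes is required, so recurse over the rest of both the words
--     elif (a[0]== 'a' or a[0]== 'e' or a[0]== 'i' or a[0]== 'o' or a[0]== 'u') and (b[0]!= 'a' and b[0]!= 'e' and b[0]!= 'i' and b[0]!= 'o' and b[0]!= 'u'):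
--         return (min(1+stringProblem(a[1:],b),1+stringProblem(a,b[1:])))     #if 1st letter of a is a vowel and that of b is not, we can only delete or inert a char there, so min of those 2 opperations
--     else:
--         return(min(1+stringProblem(a[1:],b),1+stringProblem(a,b[1:]),1+stringProblem(a[1:],b[1:]))) # min of delete,insert or replace respectively for all other cases
-- ===== SOURCE B (Python) =====
-- def stringProblem(a, b):
--     vowels = set('aeiou')
--     n, m = len(a), len(b)
--     # row[j] = cost of transforming a[i:] into b[j:]
--     row = list(range(m, -1, -1))
--     for i in range(n - 1, -1, -1):
--         new = [0] * (m + 1)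
--         new[m] = n - i
--         for j in range(m - 1, -1, -1):
--             if a[i] == b[j]:
--                 new[j] = row[j + 1]
--             elif a[i] in vowels and b[j] not in vowels:
--                 new[j] = 1 + min(row[j], new[j + 1])
--             else:
--                 new[j] = 1 + min(row[j], new[j + 1], row[j + 1])
--         row = new
--     return row[0]
-- ===== Notes on version B (the rewrite author's own statement) =====
-- stated objective: faster
-- what changed: Replaced the exponential branching recursion with a bottom-up dynamic-programming table over suffix index pairs (one row kept at a time), applying the same per-cell vowel-restricted edit rules; intended as faster (exponential vs O(|a|*|b|)); measured: A timed out at n=16 where B returned, so no timing ratio could be read.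
import Mathlib
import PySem

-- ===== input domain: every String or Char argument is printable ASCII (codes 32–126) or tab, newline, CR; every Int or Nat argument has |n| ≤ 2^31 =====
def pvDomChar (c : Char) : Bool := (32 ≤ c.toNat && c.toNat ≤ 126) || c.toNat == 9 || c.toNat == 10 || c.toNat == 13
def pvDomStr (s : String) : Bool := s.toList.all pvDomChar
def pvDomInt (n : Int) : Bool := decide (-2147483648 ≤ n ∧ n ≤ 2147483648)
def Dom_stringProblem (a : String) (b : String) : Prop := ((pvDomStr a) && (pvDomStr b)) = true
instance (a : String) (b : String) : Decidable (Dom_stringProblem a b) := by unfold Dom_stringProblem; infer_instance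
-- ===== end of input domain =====

-- B replaces A's branching recursion by a bottom-up DP over suffix index pairs (same per-cell vowel-restricted edit rules); intended as faster (measured: A timed out at n=16 where B returned; no ratio could be read).

-- ===== PORT A =====
-- A: branching recursion on string suffixes (exponential); ported on List Char.
def aGo : List Char → List Char → Int
  | as, bs =>
    if as = bs then 0
    else
      match as, bs with
      | as', [] => (as'.length : Int)
      | [], bs' => (bs'.length : Int)
      | x :: xs, y :: ys =>
        if x = y then aGo xs ys
        else if (x = 'a' ∨ x = 'e' ∨ x = 'i' ∨ x = 'o' ∨ x = 'u') ∧
                (y ≠ 'a' ∧ y ≠ 'e' ∧ y ≠ 'i' ∧ y ≠ 'o' ∧ y ≠ 'u') then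
          min (1 + aGo xs (y :: ys)) (1 + aGo (x :: xs) ys)
        else
          min (1 + aGo xs (y :: ys)) (min (1 + aGo (x :: xs) ys) (1 + aGo xs ys))
termination_by as bs => as.length + bs.length
decreasing_by all_goals (simp; try omega)

def stringProblem (a : String) (b : String) : Int := aGo a.toList b.toList

-- ===== PORT B =====
-- B: dynamic programming, one row per a-suffix, computed right-to-left.
def rowStep (c : Char) (base : Int) : List Char → List Int → List Int
  | [], _prev => [base]
  | y :: ys, prev =>
      let rest := rowStep c base ys prev.tail
      let v : Int :=
        if c = y then prev.tail.headD 0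
        else if c ∈ (['a', 'e', 'i', 'o', 'u'] : List Char) ∧
                y ∉ (['a', 'e', 'i', 'o', 'u'] : List Char) then
          1 + min (prev.headD 0) (rest.headD 0)
        else
          1 + min (prev.headD 0) (min (rest.headD 0) (prev.tail.headD 0))
      v :: rest

def altGo (ys : List Char) : List Char → List Int
  | [] => (List.range (ys.length + 1)).map (fun j : Nat => ((ys.length : Int) - (j : Int)))
  | c :: xs => rowStep c ((c :: xs).length : Int) ys (altGo ys xs)

def stringProblem_alt (a : String) (b : String) : Int :=
  (altGo b.toList a.toList).headD 0

-- ===== PRECONDITION & SPEC =====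

def Spec_stringProblem (a : String) (b : String) (out : Int) : Prop := out = stringProblem_alt a b
instance (a : String) (b : String) (out : Int) : Decidable (Spec_stringProblem a b out) := by unfold Spec_stringProblem; infer_instance

-- ===== CLAIM (what is proved, stated in full; the proofs are below) =====
def Claim_equal_stringProblem : Prop := ∀ (a : String) (b : String), Dom_stringProblem a b → Spec_stringProblem a b (stringProblem a b)

-- ===== LEMMAS AND PROOFS =====

-- costs of as against every suffix of ys (ys itself first, [] last)
def suffCosts (xs : List Char) : List Char → List Int
  | [] => [aGo xs []]
  | y :: ys => aGo xs (y :: ys) :: suffCosts xs ys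

theorem aGo_self (l : List Char) : aGo l l = 0 := by
  unfold aGo; simp

theorem aGo_nil_right (as : List Char) : aGo as [] = (as.length : Int) := by
  unfold aGo
  cases as with
  | nil => simp
  | cons x xs => simp

theorem aGo_nil_left (bs : List Char) : aGo [] bs = (bs.length : Int) := by
  unfold aGo
  cases bs with
  | nil => simp
  | cons y ys => simp

theorem suffCosts_head (xs ys : List Char) :
    (suffCosts xs ys).headD 0 = aGo xs ys := by
  cases ys <;> simp [suffCosts]

theorem suffCosts_nil (ys : List Char) :
    suffCosts [] ys = (List.range (ys.length + 1)).map (fun j : Nat => ((ys.length : Int) - (j : Int))) := by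
  induction ys with
  | nil => simp [suffCosts, aGo_nil_left, List.range_succ]
  | cons y ys ih =>
      rw [suffCosts, aGo_nil_left, ih]
      simp only [List.length_cons]
      conv_rhs => rw [List.range_succ_eq_map]
      simp only [List.map_cons, List.map_map]
      refine List.cons_eq_cons.mpr ⟨by push_cast; ring, ?_⟩
      apply List.map_congr_left
      intro j _
      simp [Function.comp, Nat.succ_eq_add_one]

theorem altGo_nil (ys : List Char) : altGo ys [] = suffCosts [] ys := by
  rw [suffCosts_nil, altGo]

theorem rowStep_suffCosts (c : Char) (xs : List Char) (ys : List Char) :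
    rowStep c (((c :: xs).length : Int)) ys (suffCosts xs ys) = suffCosts (c :: xs) ys := by
  induction ys with
  | nil => simp [rowStep, suffCosts, aGo_nil_right]
  | cons y ys ih =>
      show rowStep c _ (y :: ys) (aGo xs (y :: ys) :: suffCosts xs ys) = _
      rw [rowStep]
      simp only [List.tail_cons, List.headD_cons, ih, suffCosts_head]
      congr 1
      by_cases hxy : c = y
      · subst hxy
        rw [if_pos rfl]
        conv_rhs => rw [aGo]
        by_cases h : c :: xs = c :: ys
        · rw [if_pos h]
          obtain rfl : xs = ys := by injection h
          rw [aGo_self]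
        · rw [if_neg h]
          simp
      · rw [if_neg hxy]
        have hne : c :: xs ≠ y :: ys := fun hh => hxy (by injection hh)
        conv_rhs => rw [aGo]
        rw [if_neg hne]
        simp only [List.mem_cons, List.not_mem_nil, or_false]
        split <;> split <;> first | omega | (exact absurd (by assumption) hxy) | (exfalso; tauto)

theorem altGo_eq (ys xs : List Char) : altGo ys xs = suffCosts xs ys := by
  induction xs with
  | nil => exact altGo_nil ys
  | cons c xs ih =>
      rw [altGo, ih, rowStep_suffCosts]

-- ===== VERDICT (by name: the statement is the Claim_ definition above) =====
theorem stringProblem_spec : Claim_equal_stringProblem := by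
  intro a b _
  unfold Spec_stringProblem stringProblem stringProblem_alt
  rw [altGo_eq, suffCosts_head]
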